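-- pv_equiv track=rewrite | github.com/seunghk1206/1-Manhattan-FullStack-Development | tests/test#2.py | Rsolution
-- ===== SOURCE A (Python) =====
-- def Rsolution(A):
--     countList = []
--     count = 0
--     for each in range(len(A)):
--         for i in range(len(A)):
--             if A[each] == 1 and A[i] == 6:
--                 count += 2
--             elif A[each] == 2 and A[i] == 5:
--                 count += 2
--             elif A[each] == 3 and A[i] == 4:
--                 count += 2
--             elif A[each] == 4 and A[i] == 3:
--                 count += 2
--             elif A[each] == 5 and A[i] == 2:
--                 count += 2
--             elif A[each] == 6 and A[i] == 1:
--                 count += 2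
--             elif A[each] == A[i]:
--                 count += 0
--             else:
--                 count += 1
--         countList.append(count)
--         count = 0
--     return min(countList)
-- ===== SOURCE B (Python) =====
-- def Rsolution(A):
--     n = len(A)
--     freq = {}
--     for v in A:
--         freq[v] = freq.get(v, 0) + 1
--     best = None
--     for v in freq:
--         cp = freq.get(7 - v, 0) if 1 <= v <= 6 else 0
--         cost = 2 * cp + (n - freq[v] - cp)
--         if best is None or cost < best:
--             best = cost
--     return best
-- ===== Notes on version B (the rewrite author's own statement) =====
-- stated objective: faster
-- what changed: Replaced the O(n^2) double scan by a single frequency-table pass: each element's cost is computed in O(1) from the counts of its value and its 7-complement, and the minimum is taken over distinct values only.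
-- outside the precondition, e.g. on Rsolution([]): A raises ValueError, B returns None
import Mathlib
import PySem

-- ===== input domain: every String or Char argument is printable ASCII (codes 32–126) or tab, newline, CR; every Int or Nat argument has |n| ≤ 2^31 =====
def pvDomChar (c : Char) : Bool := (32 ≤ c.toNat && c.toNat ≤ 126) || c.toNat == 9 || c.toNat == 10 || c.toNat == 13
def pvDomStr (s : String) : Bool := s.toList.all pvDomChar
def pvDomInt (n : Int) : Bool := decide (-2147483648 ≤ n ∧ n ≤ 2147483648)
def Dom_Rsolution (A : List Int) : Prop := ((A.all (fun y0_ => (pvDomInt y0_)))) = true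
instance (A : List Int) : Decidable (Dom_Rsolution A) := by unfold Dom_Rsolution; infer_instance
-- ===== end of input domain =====

-- B replaces A's O(n^2) double scan by a single frequency table: each element's cost is
-- 2*count(7-v) + (n - count(v) - count(7-v)), and the minimum is taken over distinct values.

-- ===== PORT A =====
-- the per-pair contribution of A's inner-loop branch chain
def pvCellA (x y : Int) : Int :=
  if x = 1 ∧ y = 6 then 2
  else if x = 2 ∧ y = 5 then 2
  else if x = 3 ∧ y = 4 then 2
  else if x = 4 ∧ y = 3 then 2
  else if x = 5 ∧ y = 2 then 2
  else if x = 6 ∧ y = 1 then 2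
  else if x = y then 0
  else 1

def Rsolution (A : List Int) : Int :=
  let countList : List Int :=
    (PySem.List.pyRange 0 (PySem.List.len A)).foldl
      (fun cl each =>
        let count :=
          (PySem.List.pyRange 0 (PySem.List.len A)).foldl
            (fun count i =>
              count + pvCellA (PySem.List.pyGetD A each 0) (PySem.List.pyGetD A i 0)) 0
        cl ++ [count]) []
  -- Python's min(countList) raises ValueError on []; Pre_ excludes the empty list
  (PySem.List.min? countList (fun y => y)).getD 0

-- ===== PORT B =====
def pvCost (n : Int) (freq : PySem.Dict Int Int) (v : Int) : Int :=
  let cp := if 1 ≤ v ∧ v ≤ 6 then freq.getD (7 - v) 0 else 0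
  2 * cp + (n - freq.getD v 0 - cp)

def Rsolution_alt (A : List Int) : Int :=
  let n : Int := PySem.List.len A
  let freq := A.foldl (fun d v => d.insert v (d.getD v 0 + 1)) PySem.Dict.empty
  let best :=
    freq.keys.foldl
      (fun (b : Option Int) v =>
        let cost := pvCost n freq v
        match b with
        | none => some cost
        | some b0 => if cost < b0 then some cost else some b0) none
  -- Python's B returns None on []; Pre_ excludes the empty list
  best.getD 0

-- ===== PRECONDITION & SPEC =====
-- A raises ValueError (min of an empty sequence) on []; excluded.
def Pre_Rsolution (A : List Int) : Prop := A ≠ []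
instance (A : List Int) : Decidable (Pre_Rsolution A) := by unfold Pre_Rsolution; infer_instance
def pvWitness_Rsolution : List Int := ([1, 6, 2])

def Spec_Rsolution (A : List Int) (out : Int) : Prop := out = Rsolution_alt A
instance (A : List Int) (out : Int) : Decidable (Spec_Rsolution A out) := by unfold Spec_Rsolution; infer_instance

-- ===== CLAIM (what is proved, stated in full; the proofs are below) =====
def Claim_equal_Rsolution : Prop := ∀ (A : List Int), Dom_Rsolution A → Pre_Rsolution A → Spec_Rsolution A (Rsolution A)

-- ===== LEMMAS AND PROOFS =====

-- closed form of one cell of A's branch chain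
lemma pvCellA_eq (x y : Int) :
    pvCellA x y = if (1 ≤ x ∧ x ≤ 6) ∧ y = 7 - x then 2 else if y = x then 0 else 1 := by
  unfold pvCellA
  split_ifs <;> omega

-- partner count used by both closed forms
def pvP (l : List Int) (x : Int) : Int :=
  if 1 ≤ x ∧ x ≤ 6 then (l.count (7 - x) : Int) else 0

-- A's inner loop over l sums the cells: closed form via counts
lemma foldl_cell (x : Int) (l : List Int) (c0 : Int) :
    l.foldl (fun c a => c + pvCellA x a) c0
      = c0 + 2 * pvP l x + ((l.length : Int) - l.count x - pvP l x) := by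
  induction l generalizing c0 with
  | nil => simp [pvP]
  | cons a t ih =>
    rw [List.foldl_cons, ih]
    simp only [pvP, pvCellA_eq, List.count_cons, List.length_cons, beq_iff_eq]
    split_ifs <;> push_cast <;> omega

-- A's per-element cost equals B's frequency-table cost
lemma cost_eq (A : List Int) (x : Int) :
    A.foldl (fun c a => c + pvCellA x a) 0
      = pvCost (PySem.List.len A)
          (A.foldl (fun d v => d.insert v (d.getD v 0 + 1)) PySem.Dict.empty) x := by
  rw [foldl_cell]
  unfold pvCost pvP PySem.List.len
  simp only [PySem.Dict.getD_foldl_insert_add_one, PySem.Dict.getD_empty]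
  split_ifs <;> ring

-- B's running-minimum loop, started from some b0
lemma foldl_best_some (g : Int → Int) (t : List Int) (b0 : Int) :
    t.foldl
      (fun (b : Option Int) v =>
        match b with
        | none => some (g v)
        | some b0 => if g v < b0 then some (g v) else some b0) (some b0)
      = some (t.foldl (fun m v => min m (g v)) b0) := by
  induction t generalizing b0 with
  | nil => rfl
  | cons a t ih =>
    rw [List.foldl_cons, List.foldl_cons]
    have h : (match (some b0 : Option Int) with
        | none => some (g a)
        | some b0 => if g a < b0 then some (g a) else some b0) = some (min b0 (g a)) := by
      show (if g a < b0 then some (g a) else some b0) = some (min b0 (g a))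
      split_ifs <;> congr 1 <;> omega
    rw [h, ih]

-- B's loop computes min(map g L)
lemma foldl_best_eq_min (g : Int → Int) (L : List Int) :
    L.foldl
      (fun (b : Option Int) v =>
        match b with
        | none => some (g v)
        | some b0 => if g v < b0 then some (g v) else some b0) none
      = PySem.List.min? (L.map g) (fun y => y) := by
  cases L with
  | nil => rfl
  | cons a t =>
    simp only [List.foldl_cons, List.map_cons]
    rw [PySem.List.min?_id_cons, foldl_best_some, List.foldl_map]

-- the minimum value only depends on the set of elements
lemma min_map_congr (g : Int → Int) (L1 L2 : List Int) (h : ∀ x, x ∈ L1 ↔ x ∈ L2) :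
    PySem.List.min? (L1.map g) (fun y => y) = PySem.List.min? (L2.map g) (fun y => y) := by
  rcases h1 : PySem.List.min? (L1.map g) (fun y => y) with _ | m1 <;>
    rcases h2 : PySem.List.min? (L2.map g) (fun y => y) with _ | m2
  · rfl
  · rw [PySem.List.min?_eq_none_iff, List.map_eq_nil_iff] at h1
    have hm : m2 ∈ L2.map g := PySem.List.min?_mem h2
    rcases List.mem_map.mp hm with ⟨a, ha, _⟩
    exact absurd ((h a).mpr ha) (by simp [h1])
  · rw [PySem.List.min?_eq_none_iff, List.map_eq_nil_iff] at h2
    have hm : m1 ∈ L1.map g := PySem.List.min?_mem h1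
    rcases List.mem_map.mp hm with ⟨a, ha, _⟩
    exact absurd ((h a).mp ha) (by simp [h2])
  · congr 1
    have hm1 : m1 ∈ L1.map g := PySem.List.min?_mem h1
    have hm2 : m2 ∈ L2.map g := PySem.List.min?_mem h2
    rcases List.mem_map.mp hm1 with ⟨a1, ha1, e1⟩
    rcases List.mem_map.mp hm2 with ⟨a2, ha2, e2⟩
    have h12 : m1 ≤ m2 := by
      have hmem : g a2 ∈ L1.map g := List.mem_map.mpr ⟨a2, (h a2).mpr ha2, rfl⟩
      have := PySem.List.min?_isMin h1 _ hmem
      omega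
    have h21 : m2 ≤ m1 := by
      have hmem : g a1 ∈ L2.map g := List.mem_map.mpr ⟨a1, (h a1).mp ha1, rfl⟩
      have := PySem.List.min?_isMin h2 _ hmem
      omega
    omega

-- A's result, written as min over the elements of A of the per-element cost
lemma Rsolution_eq_min (A : List Int) :
    Rsolution A
      = (PySem.List.min? (A.map (fun x => A.foldl (fun c a => c + pvCellA x a) 0))
          (fun y => y)).getD 0 := by
  simp only [Rsolution]
  rw [PySem.List.foldl_append_singleton_eq_map, List.nil_append]
  congr 2
  have hinner : ∀ each : Int,
      (PySem.List.pyRange 0 (PySem.List.len A)).foldl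
        (fun count i =>
          count + pvCellA (PySem.List.pyGetD A each 0) (PySem.List.pyGetD A i 0)) 0
      = A.foldl (fun c a => c + pvCellA (PySem.List.pyGetD A each 0) a) 0 := by
    intro each
    rw [PySem.List.foldl_pyRange_pyGetD A 0
          (fun c a => c + pvCellA (PySem.List.pyGetD A each 0) a) 0 (le_refl 0)]
    simp
  have houter : ∀ g : Int → Int,
      (PySem.List.pyRange 0 (PySem.List.len A)).map
          (fun each => g (PySem.List.pyGetD A each 0)) = A.map g := by
    intro g
    conv_rhs => rw [← PySem.List.map_pyGetD_pyRange_zero A 0]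
    rw [List.map_map]
    rfl
  calc (PySem.List.pyRange 0 (PySem.List.len A)).map
          (fun each =>
            (PySem.List.pyRange 0 (PySem.List.len A)).foldl
              (fun count i =>
                count + pvCellA (PySem.List.pyGetD A each 0) (PySem.List.pyGetD A i 0)) 0)
      = (PySem.List.pyRange 0 (PySem.List.len A)).map
          (fun each => A.foldl (fun c a => c + pvCellA (PySem.List.pyGetD A each 0) a) 0) :=
        List.map_congr_left (fun i _ => hinner i)
    _ = A.map (fun x => A.foldl (fun c a => c + pvCellA x a) 0) :=
        houter (fun x => A.foldl (fun c a => c + pvCellA x a) 0)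

-- B's result, written as min over the distinct elements of A of the same cost
lemma Rsolution_alt_eq_min (A : List Int) :
    Rsolution_alt A
      = (PySem.List.min? ((PySem.Set.ofList A).map
            (pvCost (PySem.List.len A)
              (A.foldl (fun d v => d.insert v (d.getD v 0 + 1)) PySem.Dict.empty)))
          (fun y => y)).getD 0 := by
  simp only [Rsolution_alt]
  have hkeys :
      (A.foldl (fun d v => d.insert v (d.getD v 0 + 1))
        (PySem.Dict.empty : PySem.Dict Int Int)).keys = PySem.Set.ofList A := by
    rw [PySem.Dict.keys_foldl_insert A (fun d v => d.getD v 0 + 1) PySem.Dict.empty]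
    simp [PySem.Dict.keys_empty, PySem.Set.update_nil_left]
  rw [hkeys, foldl_best_eq_min]

-- ===== VERDICT (by name: the statement is the Claim_ definition above) =====
theorem Rsolution_spec : Claim_equal_Rsolution := by
  intro A _ _
  unfold Spec_Rsolution
  rw [Rsolution_eq_min, Rsolution_alt_eq_min]
  congr 1
  rw [List.map_congr_left (fun x _ => cost_eq A x)]
  exact min_map_congr _ A (PySem.Set.ofList A) (fun x => (PySem.Set.mem_ofList A x).symm)
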